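-- pv_equiv track=rewrite | github.com/tonybnya/coding-challenges | dsa/dsa_013_valid_words.py | valid_words
-- ===== SOURCE A (Python) =====
-- def valid_words(permitted: str, words: list[str]) -> int:
--     """
--     Solution:
--     Time Complexity: O(n + m) n is the number of words, m is the average length of each word
--     Space Complexity: O(k) k is the number of unique characters in the permitted string
--     """
--     hset: set = set(permitted)
--     count: int = 0
--
--     for word in words:
--         is_valid = True
--         for c in word:
--             if c not in hset:
--                 is_valid = False
--                 break
--
--         if is_valid:
--             count += 1
--
--     return count
-- ===== SOURCE B (Python) =====
-- def valid_words(permitted: str, words: list[str]) -> int: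
--     # Build a translation table that deletes every permitted character; a word
--     # is valid iff translating it deletes the whole word (any offending
--     # character survives the translation).
--     delete = {ord(c): None for c in permitted}
--     return sum(1 for w in words if not w.translate(delete))
-- ===== Notes on version B (the rewrite author's own statement) =====
-- stated objective: alternative
-- what changed: Drops the permitted-character set and the per-character scan with a boolean flag: B builds a translation table deleting every permitted character and counts a word as valid iff str.translate deletes the whole word, summed over a generator.
import Mathlib
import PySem

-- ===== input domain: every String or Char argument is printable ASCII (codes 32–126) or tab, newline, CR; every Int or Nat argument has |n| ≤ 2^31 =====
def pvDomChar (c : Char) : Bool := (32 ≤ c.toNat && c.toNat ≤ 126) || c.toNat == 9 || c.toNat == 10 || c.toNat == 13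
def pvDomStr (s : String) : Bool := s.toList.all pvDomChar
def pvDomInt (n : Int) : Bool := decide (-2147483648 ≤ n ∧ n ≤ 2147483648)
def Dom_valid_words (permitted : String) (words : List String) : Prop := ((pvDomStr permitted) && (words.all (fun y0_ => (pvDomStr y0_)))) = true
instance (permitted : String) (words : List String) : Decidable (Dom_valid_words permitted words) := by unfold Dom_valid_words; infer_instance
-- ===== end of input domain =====

-- B drops A's permitted-set and per-character flag/break scan: it builds a translation
-- table deleting every permitted character and counts a word as valid iff str.translate
-- deletes it entirely (alternative mechanism; same cost).


-- ===== PORT A =====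
-- inner loop of A: is_valid = True; for c in word: if c not in hset: is_valid = False; break
def vwInner (hset : PySem.Set Char) : List Char → Bool
  | [] => true
  | c :: cs => if ¬ hset.contains c then false else vwInner hset cs

def valid_words (permitted : String) (words : List String) : Int :=
  let hset : PySem.Set Char := PySem.Set.ofList permitted.toList
  words.foldl (fun count word =>
    let is_valid := vwInner hset word.toList
    if is_valid then count + 1 else count) 0

-- ===== PORT B =====
-- delete = {ord(c): None for c in permitted}  (dict[int, None]; values are Python None = `none`)
-- w.translate(delete): a table whose values are all None deletes exactly the characters whose
-- code point is a key and keeps every other character unchanged — the filter below is exact there.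
-- sum(1 for w in words if not w.translate(delete))
def valid_words_alt (permitted : String) (words : List String) : Int :=
  let delete : PySem.Dict Int (Option Int) :=
    permitted.toList.foldl (fun d c => d.insert (c.toNat : Int) none) PySem.Dict.empty
  words.foldl (fun acc w =>
    acc + (if String.ofList (w.toList.filter
             (fun c => ¬ delete.contains ((c.toNat : Int)))) = "" then 1 else 0)) 0

-- ===== PRECONDITION & SPEC =====
def Spec_valid_words (permitted : String) (words : List String) (out : Int) : Prop := out = valid_words_alt permitted words
instance (permitted : String) (words : List String) (out : Int) : Decidable (Spec_valid_words permitted words out) := by unfold Spec_valid_words; infer_instance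

-- ===== CLAIM (what is proved, stated in full; the proofs are below) =====
def Claim_equal_valid_words : Prop := ∀ (permitted : String) (words : List String), Dom_valid_words permitted words → Spec_valid_words permitted words (valid_words permitted words)

-- ===== LEMMAS AND PROOFS =====
theorem vwInner_eq_true_iff (h : PySem.Set Char) (l : List Char) :
    vwInner h l = true ↔ ∀ c ∈ l, h.contains c = true := by
  induction l with
  | nil => simp [vwInner]
  | cons c cs ih =>
    cases hc : h.contains c with
    | false =>
      rw [vwInner, if_pos (by intro h'; rw [hc] at h'; exact Bool.false_ne_true h')]
      simp only [Bool.false_eq_true, false_iff]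
      intro hAll
      have := hAll c (List.mem_cons_self ..)
      rw [this] at hc
      simp at hc
    | true =>
      rw [vwInner, if_neg (by simp [List.contains_iff_mem.mp hc]), ih]
      constructor
      · intro h1 a ha
        rcases List.mem_cons.mp ha with rfl | ha'
        · exact hc
        · exact h1 a ha'
      · intro h1 a ha
        exact h1 a (List.mem_cons_of_mem _ ha)

theorem char_toNat_int_inj (a c : Char) (h : (a.toNat : Int) = (c.toNat : Int)) : a = c := by
  have h2 : a.toNat = c.toNat := Int.ofNat.inj h
  apply Char.ext
  unfold Char.toNat at h2
  exact UInt32.toNat_inj.mp h2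

theorem contains_foldl_insert (l : List Char) (d : PySem.Dict Int (Option Int)) (k : Int) :
    (l.foldl (fun d c => d.insert ((c.toNat : Int)) none) d).contains k
      = (d.contains k || l.any (fun c => k == ((c.toNat : Int)))) := by
  induction l generalizing d with
  | nil => simp
  | cons a l ih =>
    simp only [List.foldl_cons, List.any_cons]
    rw [ih, PySem.Dict.contains_insert]
    cases k == ((a.toNat : Int)) <;> simp

theorem delete_contains_iff (permitted : String) (c : Char) :
    ((permitted.toList.foldl (fun d c => d.insert ((c.toNat : Int)) none)
        (PySem.Dict.empty : PySem.Dict Int (Option Int))).contains ((c.toNat : Int)) = true)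
      ↔ c ∈ permitted.toList := by
  rw [contains_foldl_insert]
  have hemp : (PySem.Dict.empty : PySem.Dict Int (Option Int)).contains ((c.toNat : Int)) = false := by
    simp [PySem.Dict.contains, PySem.Dict.empty]
  rw [hemp]
  simp only [Bool.false_or, List.any_eq_true, beq_iff_eq]
  constructor
  · rintro ⟨a, ha, hk⟩
    exact (char_toNat_int_inj a c hk.symm) ▸ ha
  · intro hc
    exact ⟨c, hc, rfl⟩

theorem ofList_eq_empty_iff (l : List Char) : String.ofList l = "" ↔ l = [] := by
  constructor
  · intro h
    have := congrArg String.toList h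
    simpa using this
  · intro h
    simp [h]

theorem vwInner_eq_translate (permitted : String) (w : String) :
    vwInner (PySem.Set.ofList permitted.toList) w.toList = true
      ↔ String.ofList (w.toList.filter
          (fun c => ¬ (permitted.toList.foldl (fun d c => d.insert ((c.toNat : Int)) none)
            (PySem.Dict.empty : PySem.Dict Int (Option Int))).contains ((c.toNat : Int)))) = "" := by
  rw [vwInner_eq_true_iff, ofList_eq_empty_iff, List.filter_eq_nil_iff]
  constructor
  · intro h c hc
    have hm : c ∈ permitted.toList :=
      (PySem.Set.mem_ofList _ _).mp (List.contains_iff_mem.mp (h c hc))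
    simp [(delete_contains_iff permitted c).mpr hm]
  · intro h c hc
    have := h c hc
    simp only [decide_not, Bool.not_eq_true', decide_eq_false_iff_not, Decidable.not_not] at this
    exact List.contains_iff_mem.mpr
      ((PySem.Set.mem_ofList _ _).mpr ((delete_contains_iff permitted c).mp this))

theorem vw_foldl_eq (permitted : String) (ws : List String) (acc : Int) :
    ws.foldl (fun count word =>
      let is_valid := vwInner (PySem.Set.ofList permitted.toList) word.toList
      if is_valid then count + 1 else count) acc
    = ws.foldl (fun a w =>
      a + (if String.ofList (w.toList.filter
            (fun c => ¬ (permitted.toList.foldl (fun d c => d.insert ((c.toNat : Int)) none)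
              (PySem.Dict.empty : PySem.Dict Int (Option Int))).contains ((c.toNat : Int)))) = ""
          then 1 else 0)) acc := by
  induction ws generalizing acc with
  | nil => rfl
  | cons w ws ih =>
    simp only [List.foldl_cons]
    by_cases hs : vwInner (PySem.Set.ofList permitted.toList) w.toList = true
    · rw [if_pos hs, if_pos ((vwInner_eq_translate permitted w).mp hs), ih]
    · rw [if_neg hs, if_neg (fun h => hs ((vwInner_eq_translate permitted w).mpr h)), add_zero, ih]

-- ===== VERDICT (by name: the statement is the Claim_ definition above) =====
theorem valid_words_spec : Claim_equal_valid_words := by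
  intro permitted words _
  unfold Spec_valid_words valid_words valid_words_alt
  exact vw_foldl_eq permitted words 0
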